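-- pv_equiv track=rewrite | github.com/shivcsaraswat/uber-billing-analytics | utils/utils.py | find_distance_duration
-- ===== SOURCE A (Python) =====
-- def find_distance_duration(query, text):
--      split_text = text.split('\n')
--      distance = ""
--      duration = ""
--      for line in split_text:
--           if query in line:
--                distDurSplit = line.split('|')
--                distance = distDurSplit[0]
--                duration = distDurSplit[1][:-1]
--                break
--      return distance, duration
-- ===== SOURCE B (Python) =====
-- def find_distance_duration(query, text):
--     # index math on the raw string instead of building the list of all lines
--     if '\n' in query:
--         return "", ""
--     idx = text.find(query)
--     if idx == -1:
--         return "", ""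
--     start = text.rfind('\n', 0, idx) + 1
--     end = text.find('\n', idx)
--     if end == -1:
--         end = len(text)
--     line = text[start:end]
--     parts = line.split('|')
--     return parts[0], parts[1][:-1]
-- ===== Notes on version B (the rewrite author's own statement) =====
-- stated objective: alternative
-- what changed: A splits the whole text into a list of lines and scans it for the first line containing the query; B never builds that list: it locates the query with text.find, recovers the enclosing line by rfind/find index math on the raw string, and slices it out.
import Mathlib
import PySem

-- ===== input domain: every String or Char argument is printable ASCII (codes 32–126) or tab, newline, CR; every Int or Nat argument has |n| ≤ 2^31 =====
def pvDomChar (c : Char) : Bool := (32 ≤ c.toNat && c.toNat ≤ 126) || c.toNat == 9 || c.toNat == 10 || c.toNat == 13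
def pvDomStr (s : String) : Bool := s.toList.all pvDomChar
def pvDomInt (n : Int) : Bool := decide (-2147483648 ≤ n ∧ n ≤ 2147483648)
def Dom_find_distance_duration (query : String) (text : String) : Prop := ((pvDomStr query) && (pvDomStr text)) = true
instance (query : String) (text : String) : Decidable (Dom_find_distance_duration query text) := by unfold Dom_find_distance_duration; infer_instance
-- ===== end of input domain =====

-- B replaces A's split-into-all-lines-and-scan by direct index math (find / rfind / slice) on the raw string (objective: alternative).


-- ===== PORT A =====
-- the for-loop over the list of lines; distance/duration start as "" and are set at the first matching line, then break
def fddLoop (query : String) : List String → String × String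
  | [] => ("", "")
  | line :: rest =>
    if PySem.Str.isIn query line then
      let distDurSplit := (PySem.Str.split? line "|").getD []
      (PySem.List.pyGetD distDurSplit 0 "",
       PySem.Str.slice (PySem.List.pyGetD distDurSplit 1 "") none (some (-1)))
    else fddLoop query rest

def find_distance_duration (query : String) (text : String) : String × String :=
  fddLoop query ((PySem.Str.split? text "\n").getD [])

-- ===== PORT B =====
def find_distance_duration_alt (query : String) (text : String) : String × String :=
  if PySem.Str.isIn "\n" query then ("", "")
  else
    let idx := PySem.Str.find text query
    if idx = -1 then ("", "")
    else
      let start := PySem.Str.rfindFrom text "\n" 0 (some idx) + 1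
      let e0 := PySem.Str.findFrom text "\n" idx none
      let e : Int := if e0 = -1 then PySem.Str.len text else e0
      let line := PySem.Str.slice text (some start) (some e)
      let parts := (PySem.Str.split? line "|").getD []
      (PySem.List.pyGetD parts 0 "",
       PySem.Str.slice (PySem.List.pyGetD parts 1 "") none (some (-1)))

-- ===== PRECONDITION & SPEC =====
-- Pre_ excludes exactly the inputs on which Python A raises IndexError: when some line of the
-- text contains the query, the first such line must itself contain a '|' (A indexes parts[1];
-- Python B raises the same IndexError there).
def Pre_find_distance_duration (query : String) (text : String) : Prop :=
  ∀ l ∈ (PySem.Chars.splitOn text.toList ['\n']).find? (fun l => PySem.Chars.isIn query.toList l),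
    PySem.Chars.isIn ['|'] l = true

instance (query : String) (text : String) : Decidable (Pre_find_distance_duration query text) := by
  unfold Pre_find_distance_duration; infer_instance

def pvWitness_find_distance_duration : String × String := ("2", "12|34m\nxx")

def Spec_find_distance_duration (query : String) (text : String) (out : String × String) : Prop := out = find_distance_duration_alt query text
instance (query : String) (text : String) (out : String × String) : Decidable (Spec_find_distance_duration query text out) := by unfold Spec_find_distance_duration; infer_instance

-- ===== CLAIM (what is proved, stated in full; the proofs are below) =====
def Claim_equal_find_distance_duration : Prop := ∀ (query : String) (text : String), Dom_find_distance_duration query text → Pre_find_distance_duration query text → Spec_find_distance_duration query text (find_distance_duration query text)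

-- ===== LEMMAS AND PROOFS =====

-- the common tail of both programs: split the found line on '|' and emit (parts[0], parts[1][:-1])
def pvEmit (line : String) : String × String :=
  (PySem.List.pyGetD ((PySem.Str.split? line "|").getD []) 0 "",
   PySem.Str.slice (PySem.List.pyGetD ((PySem.Str.split? line "|").getD []) 1 "") none (some (-1)))

-- the line B extracts around an occurrence at index i, at the List Char level
def pvLineOfB (S : List Char) (i : Int) : List Char :=
  PySem.List.slice S
    (some (PySem.Chars.rfindFrom S ['\n'] 0 (some i) + 1))
    (some (if PySem.Chars.findFrom S ['\n'] i none = -1 then (S.length : Int)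
           else PySem.Chars.findFrom S ['\n'] i none))

theorem pv_prefix_drop_infix {Q S : List Char} {i : Nat} (h : Q <+: S.drop i) : Q <:+: S :=
  List.infix_iff_prefix_suffix.mpr ⟨S.drop i, h, List.drop_suffix i S⟩

theorem pvX {Q a b : List Char} (hq : '\n' ∉ Q) {j : Nat} (hj : j ≤ a.length) :
    (Q <+: (a ++ '\n' :: b).drop j) ↔ Q <+: a.drop j := by
  rw [List.drop_append_of_le_length hj]
  constructor
  · intro h
    by_cases hlen : Q.length ≤ (a.drop j).length
    · rw [List.prefix_iff_eq_take] at h ⊢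
      rwa [List.take_append_of_le_length hlen] at h
    · exfalso
      apply hq
      rw [List.prefix_iff_eq_take] at h
      have hD : (a.drop j).length < Q.length := by omega
      have hmem : Q[(a.drop j).length]'hD ∈ Q := List.getElem_mem _
      have hval : Q[(a.drop j).length]'hD = '\n' := by
        rw [List.getElem_of_eq h, List.getElem_take,
            List.getElem_append_right (le_refl (a.drop j).length)]
        simp
      rwa [hval] at hmem
  · intro h
    exact h.trans (List.prefix_append _ _)

theorem pv_mem_of_spdrop {c : Char} {l : List Char} {i : Nat} (hpre : [c] <+: l.drop i) : c ∈ l := by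
  have h1 : c ∈ l.drop i := hpre.subset (by simp)
  exact List.drop_subset _ _ h1

theorem pv_drop_high {a b : List Char} {c : Char} (k : Nat) :
    (a ++ c :: b).drop (a.length + 1 + k) = b.drop k := by
  rw [List.drop_append, List.drop_eq_nil_of_le (by omega)]
  simp only [List.nil_append]
  rw [show a.length + 1 + k - a.length = k + 1 by omega]
  rfl

theorem pv_find_unique {S Q : List Char} {i : Nat}
    (h1 : Q <+: S.drop i) (h2 : ∀ j < i, ¬ Q <+: S.drop j) :
    PySem.Chars.find S Q = i := by
  have hinf : Q <:+: S := pv_prefix_drop_infix h1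
  have hnn : 0 ≤ PySem.Chars.find S Q := (PySem.Chars.find_nonneg_iff S Q).mpr hinf
  obtain ⟨hp, hmin⟩ := PySem.Chars.find_spec hnn
  have : (PySem.Chars.find S Q).toNat = i := by
    rcases Nat.lt_trichotomy (PySem.Chars.find S Q).toNat i with h | h | h
    · exact absurd hp (h2 _ h)
    · exact h
    · exact absurd h1 (hmin i h)
  omega

theorem pv_find_char_none {c : Char} {S : List Char} (h : c ∉ S) :
    PySem.Chars.find S [c] = -1 := by
  rw [PySem.Chars.find_eq_neg_one_iff]
  intro hinf
  exact h (hinf.subset (by simp))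

theorem pv_find_char_app {c : Char} {a b : List Char} (h : c ∉ a) :
    PySem.Chars.find (a ++ c :: b) [c] = a.length := by
  apply pv_find_unique
  · rw [List.drop_append_of_le_length (le_refl _)]
    simp
  · intro j hj hpre
    rw [List.drop_append_of_le_length (le_of_lt hj)] at hpre
    obtain ⟨t, ht⟩ := hpre
    have : a.drop j ++ c :: b = a[j] :: (a.drop (j+1) ++ c :: b) := by
      rw [List.drop_eq_getElem_cons hj]; rfl
    rw [this] at ht
    simp at ht
    exact h (ht.1 ▸ List.getElem_mem _)

theorem pv_find_app_left {Q a b : List Char} (hq : '\n' ∉ Q) (h : Q <:+: a) :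
    PySem.Chars.find (a ++ '\n' :: b) Q = PySem.Chars.find a Q := by
  have hnn : 0 ≤ PySem.Chars.find a Q := (PySem.Chars.find_nonneg_iff a Q).mpr h
  obtain ⟨hp, hmin⟩ := PySem.Chars.find_spec hnn
  have hle : PySem.Chars.find a Q ≤ a.length := PySem.Chars.find_le_length a Q
  have := pv_find_unique (S := a ++ '\n' :: b) (Q := Q) (i := (PySem.Chars.find a Q).toNat)
    ((pvX hq (by omega)).mpr hp)
    (fun j hj hpre => hmin j hj ((pvX hq (by omega)).mp hpre))
  omega

theorem pv_find_app_right {Q a b : List Char} (hq : '\n' ∉ Q) (h : ¬ Q <:+: a)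
    (hb : 0 ≤ PySem.Chars.find b Q) :
    PySem.Chars.find (a ++ '\n' :: b) Q = a.length + 1 + PySem.Chars.find b Q := by
  obtain ⟨hp, hmin⟩ := PySem.Chars.find_spec hb
  have hle : PySem.Chars.find b Q ≤ b.length := PySem.Chars.find_le_length b Q
  have := pv_find_unique (S := a ++ '\n' :: b) (Q := Q)
      (i := a.length + 1 + (PySem.Chars.find b Q).toNat)
    (by rw [pv_drop_high]; exact hp)
    (by
      intro j hj hpre
      by_cases hja : j ≤ a.length
      · exact h (pv_prefix_drop_infix ((pvX hq hja).mp hpre))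
      · have hjj : j = a.length + 1 + (j - a.length - 1) := by omega
        rw [hjj, pv_drop_high] at hpre
        exact hmin _ (by omega) hpre)
  omega

theorem pv_find_app_none {Q a b : List Char} (hq : '\n' ∉ Q) (h : ¬ Q <:+: a)
    (hb : PySem.Chars.find b Q = -1) :
    PySem.Chars.find (a ++ '\n' :: b) Q = -1 := by
  rw [PySem.Chars.find_eq_neg_one_iff] at hb ⊢
  intro hinf
  obtain ⟨j, hj⟩ := (PySem.Chars.exists_prefix_drop_iff_isIn Q (a ++ '\n' :: b)).mpr
    ((PySem.Chars.isIn_iff_infix Q (a ++ '\n' :: b)).mpr hinf)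
  by_cases hja : j ≤ a.length
  · exact h (pv_prefix_drop_infix ((pvX hq hja).mp hj))
  · have hjj : j = a.length + 1 + (j - a.length - 1) := by omega
    rw [hjj, pv_drop_high] at hj
    exact hb (pv_prefix_drop_infix hj)

theorem pv_rfind_go_zero (s sub : List Char) : PySem.Chars.rfind.go s sub 0 = if sub.isPrefixOf s then 0 else -1 := by
  simp [PySem.Chars.rfind.go]

theorem pv_rfind_go_succ (s sub : List Char) (j : Nat) : PySem.Chars.rfind.go s sub (j+1) =
    if sub.isPrefixOf (s.drop (j+1)) then ((j+1 : Nat) : Int) else PySem.Chars.rfind.go s sub j := by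
  simp [PySem.Chars.rfind.go]

theorem pv_rfind_go_none {S Q : List Char} {n : Nat} (h : ∀ i ≤ n, ¬ Q <+: S.drop i) :
    PySem.Chars.rfind.go S Q n = -1 := by
  induction n with
  | zero =>
    rw [pv_rfind_go_zero, if_neg]
    simpa [List.isPrefixOf_iff_prefix] using h 0 (le_refl 0)
  | succ j ih =>
    rw [pv_rfind_go_succ, if_neg]
    · exact ih (fun i hi => h i (by omega))
    · simpa [List.isPrefixOf_iff_prefix] using h (j+1) (le_refl _)

theorem pv_rfind_go_some {S Q : List Char} {k n : Nat} (hk : k ≤ n) (h1 : Q <+: S.drop k)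
    (h2 : ∀ i, k < i → i ≤ n → ¬ Q <+: S.drop i) :
    PySem.Chars.rfind.go S Q n = k := by
  induction n with
  | zero =>
    have : k = 0 := by omega
    subst this
    rw [pv_rfind_go_zero,
        if_pos (by rw [List.isPrefixOf_iff_prefix]; simpa using h1)]
    simp
  | succ j ih =>
    by_cases hkj : k = j + 1
    · subst hkj
      rw [pv_rfind_go_succ, if_pos (by simpa [List.isPrefixOf_iff_prefix] using h1)]
    · rw [pv_rfind_go_succ, if_neg]
      · exact ih (by omega) (fun i hi hij => h2 i hi (by omega))
      · simp only [List.isPrefixOf_iff_prefix]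
        exact fun hc => h2 (j+1) (by omega) (le_refl _) hc

theorem pv_rfind_none_of {S Q : List Char} (h : ∀ i ≤ S.length, ¬ Q <+: S.drop i) :
    PySem.Chars.rfind S Q = -1 := pv_rfind_go_none h

theorem pv_rfind_eq_of {S Q : List Char} {k : Nat} (hk : k ≤ S.length) (h1 : Q <+: S.drop k)
    (h2 : ∀ i, k < i → i ≤ S.length → ¬ Q <+: S.drop i) :
    PySem.Chars.rfind S Q = k := pv_rfind_go_some hk h1 h2

theorem pv_rfind_go_ge (S Q : List Char) (n : Nat) : -1 ≤ PySem.Chars.rfind.go S Q n := by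
  induction n with
  | zero => simp [PySem.Chars.rfind.go]; split <;> omega
  | succ j ih =>
    rw [show PySem.Chars.rfind.go S Q (j+1) =
      if Q.isPrefixOf (S.drop (j+1)) then ((j+1 : Nat) : Int) else PySem.Chars.rfind.go S Q j
      from by simp [PySem.Chars.rfind.go]]
    split <;> omega

theorem pv_rfind_ge (S Q : List Char) : -1 ≤ PySem.Chars.rfind S Q := pv_rfind_go_ge S Q S.length

theorem pv_rfind_char_none {c : Char} {S : List Char} (h : c ∉ S) :
    PySem.Chars.rfind S [c] = -1 := by
  apply pv_rfind_none_of
  intro i _ hpre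
  exact h (pv_mem_of_spdrop hpre)

theorem pv_rfind_char_last {c : Char} {a t : List Char} (h : c ∉ t) :
    PySem.Chars.rfind (a ++ c :: t) [c] = a.length := by
  apply pv_rfind_eq_of (by simp)
  · rw [List.drop_append_of_le_length (le_refl _)]
    simp
  · intro i hi _ hpre
    have hii : i = a.length + 1 + (i - a.length - 1) := by omega
    rw [hii, pv_drop_high] at hpre
    exact h (pv_mem_of_spdrop hpre)

theorem pv_last_split {c : Char} {t : List Char} (h : c ∈ t) :
    ∃ t1 t2, t = t1 ++ c :: t2 ∧ c ∉ t2 := by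
  induction t with
  | nil => simp at h
  | cons x xs ih =>
    by_cases hx : c ∈ xs
    · obtain ⟨t1, t2, ht, hn⟩ := ih hx
      exact ⟨x :: t1, t2, by simp [ht], hn⟩
    · have : c = x := by rcases List.mem_cons.mp h with h' | h' <;> [exact h'; exact absurd h' hx]
      exact ⟨[], xs, by simp [this], hx⟩

theorem pv_first_split {c : Char} {t : List Char} (h : c ∈ t) :
    ∃ t1 t2, t = t1 ++ c :: t2 ∧ c ∉ t1 := by
  induction t with
  | nil => simp at h
  | cons x xs ih =>
    by_cases hx : x = c
    · exact ⟨[], xs, by simp [hx], by simp⟩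
    · have : c ∈ xs := by rcases List.mem_cons.mp h with h' | h' <;> [exact absurd h'.symm hx; exact h']
      obtain ⟨t1, t2, ht, hn⟩ := ih this
      exact ⟨x :: t1, t2, by simp [ht], by simp [hn]; exact fun hc => hx hc.symm⟩

theorem pv_rfind_app (a t : List Char) :
    PySem.Chars.rfind (a ++ '\n' :: t) ['\n'] =
      if PySem.Chars.rfind t ['\n'] = -1 then (a.length : Int)
      else a.length + 1 + PySem.Chars.rfind t ['\n'] := by
  by_cases hm : '\n' ∈ t
  · obtain ⟨t1, t2, rfl, hn⟩ := pv_last_split hm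
    rw [pv_rfind_char_last hn,
        show a ++ '\n' :: (t1 ++ '\n' :: t2) = (a ++ '\n' :: t1) ++ '\n' :: t2 by simp,
        pv_rfind_char_last hn]
    have : ((t1.length : Int)) ≠ -1 := by omega
    simp [this]
    ring
  · rw [pv_rfind_char_none hm, pv_rfind_char_last hm]
    simp

theorem pv_rfindFrom_eq_rfind_take {S Q : List Char} {i : Int} (h0 : 0 ≤ i) (h1 : i ≤ S.length) :
    PySem.Chars.rfindFrom S Q 0 (some i) = PySem.Chars.rfind (S.take i.toNat) Q := by
  simp only [PySem.Chars.rfindFrom]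
  split_ifs with hA hB hC hD
  all_goals simp only [Int.toNat_zero, List.drop_zero] at *
  all_goals omega

theorem pv_go_zero (l cur : List Char) (acc : List (List Char)) :
    PySem.Chars.splitOn.go ['\n'] 0 l cur acc = ((cur.reverse ++ l) :: acc).reverse := by
  simp [PySem.Chars.splitOn.go]

theorem pv_go_nil (fuel : Nat) (cur : List Char) (acc : List (List Char)) :
    PySem.Chars.splitOn.go ['\n'] (fuel+1) [] cur acc = (cur.reverse :: acc).reverse := by
  simp [PySem.Chars.splitOn.go]

theorem pv_go_cons (fuel : Nat) (c : Char) (rest cur : List Char) (acc : List (List Char)) :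
    PySem.Chars.splitOn.go ['\n'] (fuel+1) (c :: rest) cur acc =
      if c = '\n' then PySem.Chars.splitOn.go ['\n'] fuel rest [] (cur.reverse :: acc)
      else PySem.Chars.splitOn.go ['\n'] fuel rest (c :: cur) acc := by
  by_cases hc : c = '\n'
  · subst hc
    rw [if_pos rfl]
    simp [PySem.Chars.splitOn.go, List.isPrefixOf]
  · rw [if_neg hc]
    simp [PySem.Chars.splitOn.go, List.isPrefixOf]
    intro h; exact absurd h.symm hc

theorem pv_splitOn_go_acc (fuel : Nat) (l cur : List Char) (acc : List (List Char)) :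
    PySem.Chars.splitOn.go ['\n'] fuel l cur acc =
      acc.reverse ++ PySem.Chars.splitOn.go ['\n'] fuel l cur [] := by
  induction fuel generalizing l cur acc with
  | zero => simp [pv_go_zero]
  | succ f ih =>
    cases l with
    | nil => simp [pv_go_nil]
    | cons c rest =>
      rw [pv_go_cons, pv_go_cons]
      by_cases hc : c = '\n'
      · rw [if_pos hc, if_pos hc, ih, ih rest [] [cur.reverse]]
        simp
      · rw [if_neg hc, if_neg hc, ih, ih rest (c :: cur) []]

theorem pv_splitOn_go_nonl {l : List Char} (h : '\n' ∉ l) {fuel : Nat} (hf : l.length ≤ fuel)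
    (cur : List Char) (acc : List (List Char)) :
    PySem.Chars.splitOn.go ['\n'] fuel l cur acc = acc.reverse ++ [cur.reverse ++ l] := by
  induction l generalizing fuel cur with
  | nil =>
    cases fuel with
    | zero => simp [pv_go_zero]
    | succ f => simp [pv_go_nil]
  | cons c rest ih =>
    cases fuel with
    | zero => simp at hf
    | succ f =>
      rw [pv_go_cons, if_neg (by intro hc; exact h (hc ▸ List.mem_cons_self))]
      rw [ih (fun hm => h (List.mem_cons_of_mem _ hm)) (by simpa using hf)]
      simp

theorem pv_splitOn_go_app {a : List Char} (h : '\n' ∉ a) {fuel : Nat} (hf : a.length < fuel)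
    (b cur : List Char) (acc : List (List Char)) :
    PySem.Chars.splitOn.go ['\n'] fuel (a ++ '\n' :: b) cur acc =
      PySem.Chars.splitOn.go ['\n'] (fuel - a.length - 1) b [] ((cur.reverse ++ a) :: acc) := by
  induction a generalizing fuel cur with
  | nil =>
    cases fuel with
    | zero => omega
    | succ f =>
      simp only [List.nil_append]
      rw [pv_go_cons, if_pos rfl]
      simp
  | cons c rest ih =>
    cases fuel with
    | zero => simp at hf
    | succ f =>
      simp only [List.cons_append]
      rw [pv_go_cons, if_neg (by intro hc; exact h (hc ▸ List.mem_cons_self))]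
      rw [ih (fun hm => h (List.mem_cons_of_mem _ hm)) (by simpa using hf)]
      have h1 : f + 1 - (c :: rest).length - 1 = f - rest.length - 1 := by
        simp
      have h2 : cur.reverse ++ c :: rest = (c :: cur).reverse ++ rest := by simp
      rw [h1, h2]

theorem pv_splitOn_nonl {S : List Char} (h : '\n' ∉ S) :
    PySem.Chars.splitOn S ['\n'] = [S] := by
  unfold PySem.Chars.splitOn
  rw [pv_splitOn_go_nonl h (Nat.le_succ _)]
  simp

theorem pv_splitOn_app {a b : List Char} (h : '\n' ∉ a) :
    PySem.Chars.splitOn (a ++ '\n' :: b) ['\n'] = a :: PySem.Chars.splitOn b ['\n'] := by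
  unfold PySem.Chars.splitOn
  rw [pv_splitOn_go_app h (by simp)]
  rw [pv_splitOn_go_acc]
  have hfuel : (a ++ '\n' :: b).length + 1 - a.length - 1 = b.length + 1 := by
    simp
    omega
  rw [hfuel]
  simp

theorem pv_splitOn_no_nl : ∀ (n : Nat) (S : List Char), S.length ≤ n →
    ∀ l ∈ PySem.Chars.splitOn S ['\n'], '\n' ∉ l := by
  intro n
  induction n with
  | zero =>
    intro S hS l hl
    have : S = [] := List.eq_nil_of_length_eq_zero (by omega)
    subst this
    rw [pv_splitOn_nonl (by simp)] at hl
    simp at hl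
    simp [hl]
  | succ m ih =>
    intro S hS l hl
    by_cases hm : '\n' ∈ S
    · obtain ⟨a, b, rfl, hna⟩ := pv_first_split hm
      rw [pv_splitOn_app hna] at hl
      rcases List.mem_cons.mp hl with h | h
      · exact h ▸ hna
      · exact ih b (by simp at hS; omega) l h
    · rw [pv_splitOn_nonl hm] at hl
      simp at hl
      exact hl ▸ hm

theorem pv_lineOfB_nonl {S : List Char} {i : Int} (h : '\n' ∉ S) (h0 : 0 ≤ i)
    (hi : i ≤ S.length) : pvLineOfB S i = S := by
  unfold pvLineOfB
  have hcast : i = ((i.toNat : Nat) : Int) := by omega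
  rw [pv_rfindFrom_eq_rfind_take h0 hi,
      pv_rfind_char_none (fun hm => h (List.take_subset _ _ hm)),
      hcast, PySem.Chars.findFrom_natCast S ['\n'] i.toNat (by omega),
      if_pos (pv_find_char_none (fun hm => h (List.drop_subset _ _ hm))),
      if_pos rfl]
  rw [show (-1 : Int) + 1 = ((0:Nat) : Int) by omega]
  rw [PySem.List.slice_natCast]
  simp

theorem pv_lineOfB_left {a b : List Char} {i : Int} (ha : '\n' ∉ a) (h0 : 0 ≤ i)
    (hk : i ≤ a.length) : pvLineOfB (a ++ '\n' :: b) i = a := by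
  unfold pvLineOfB
  have hcast : i = ((i.toNat : Nat) : Int) := by omega
  have hkn : i.toNat ≤ a.length := by omega
  have htake : (a ++ '\n' :: b).take i.toNat = a.take i.toNat :=
    List.take_append_of_le_length hkn
  have hdrop : (a ++ '\n' :: b).drop i.toNat = a.drop i.toNat ++ '\n' :: b :=
    List.drop_append_of_le_length hkn
  rw [pv_rfindFrom_eq_rfind_take h0 (by simp; omega), htake,
      pv_rfind_char_none (fun hm => ha (List.take_subset _ _ hm)),
      hcast, PySem.Chars.findFrom_natCast _ ['\n'] i.toNat (by simp; omega),
      hdrop, pv_find_char_app (fun hm => ha (List.drop_subset _ _ hm))]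
  rw [if_neg (by omega), if_neg (by omega)]
  rw [show (-1 : Int) + 1 = ((0:Nat) : Int) by omega,
      show ((i.toNat : Nat) : Int) + ((a.drop i.toNat).length : Int) = ((a.length : Nat) : Int) by
        simp; omega]
  rw [PySem.List.slice_natCast]
  simp [List.take_append_of_le_length (le_refl a.length)]

theorem pv_lineOfB_shift {a b : List Char} {j : Int} (_ha : '\n' ∉ a) (h0 : 0 ≤ j)
    (hj : j ≤ b.length) : pvLineOfB (a ++ '\n' :: b) (a.length + 1 + j) = pvLineOfB b j := by
  unfold pvLineOfB
  have hcast : j = ((j.toNat : Nat) : Int) := by omega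
  have hbig : (a.length : Int) + 1 + j = (((a.length + 1 + j.toNat : Nat)) : Int) := by omega
  have htake : (a ++ '\n' :: b).take (a.length + 1 + j.toNat) = a ++ '\n' :: b.take j.toNat := by
    rw [List.take_append]
    rw [List.take_of_length_le (by omega), show a.length + 1 + j.toNat - a.length = j.toNat + 1 by omega]
    rfl
  have hdropS : (a ++ '\n' :: b).drop (a.length + 1 + j.toNat) = b.drop j.toNat := pv_drop_high _
  -- start side
  rw [pv_rfindFrom_eq_rfind_take (by omega) (by simp; omega),
      pv_rfindFrom_eq_rfind_take h0 (by omega)]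
  rw [show ((a.length : Int) + 1 + j).toNat = a.length + 1 + j.toNat by omega]
  rw [htake, pv_rfind_app a (b.take j.toNat)]
  -- end side
  rw [hbig, PySem.Chars.findFrom_natCast _ ['\n'] _ (by simp; omega), hdropS]
  conv_rhs => rw [hcast, PySem.Chars.findFrom_natCast _ ['\n'] _ (by omega)]
  simp only [Int.toNat_natCast]
  have hfge : (-1 : Int) ≤ PySem.Chars.find (b.drop j.toNat) ['\n'] := PySem.Chars.neg_one_le_find _ _
  have hfle : PySem.Chars.find (b.drop j.toNat) ['\n'] ≤ (b.drop j.toNat).length := PySem.Chars.find_le_length _ _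
  have hrge : (-1 : Int) ≤ PySem.Chars.rfind (b.take j.toNat) ['\n'] := pv_rfind_ge _ _
  set f := PySem.Chars.find (b.drop j.toNat) ['\n'] with hf
  set r := PySem.Chars.rfind (b.take j.toNat) ['\n'] with hr
  -- both sides are slices; show start/end shift by a.length+1
  have hslice : ∀ (st e : Int), 0 ≤ st → 0 ≤ e →
      PySem.List.slice (a ++ '\n' :: b) (some ((a.length : Int) + 1 + st)) (some ((a.length : Int) + 1 + e)) =
      PySem.List.slice b (some st) (some e) := by
    intro st e hst he
    rw [PySem.List.slice_toNat _ (by omega) (by omega), PySem.List.slice_toNat _ hst he]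
    rw [show ((a.length : Int) + 1 + st).toNat = a.length + 1 + st.toNat by omega, pv_drop_high]
    congr 1
    omega
  by_cases hrneg : r = -1
  · rw [if_pos hrneg]
    by_cases hfneg : f = -1
    · rw [if_pos hfneg, if_pos hfneg, if_pos rfl, if_pos rfl]
      have h1 : (a.length : Int) + 1 = (a.length : Int) + 1 + ((-1) + 1) := by ring
      have h2 : (((a ++ '\n' :: b).length : Nat) : Int) = (a.length : Int) + 1 + (b.length : Int) := by
        simp; omega
      rw [h1, h2, hslice _ _ (by omega) (by omega), hrneg]
    · rw [if_neg hfneg, if_neg hfneg,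
          if_neg (by omega), if_neg (by omega)]
      have h1 : (a.length : Int) + 1 = (a.length : Int) + 1 + ((-1) + 1) := by ring
      have h2 : ((a.length + 1 + j.toNat : Nat) : Int) + f = (a.length : Int) + 1 + (((j.toNat : Nat) : Int) + f) := by
        push_cast; ring
      rw [h1, h2, hslice _ _ (by omega) (by omega), hrneg]
  · rw [if_neg hrneg]
    by_cases hfneg : f = -1
    · rw [if_pos hfneg, if_pos hfneg, if_pos rfl, if_pos rfl]
      have h1 : (a.length : Int) + 1 + r + 1 = (a.length : Int) + 1 + (r + 1) := by ring
      have h2 : (((a ++ '\n' :: b).length : Nat) : Int) = (a.length : Int) + 1 + (b.length : Int) := by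
        simp; omega
      rw [h1, h2, hslice _ _ (by omega) (by omega)]
    · rw [if_neg hfneg, if_neg hfneg, if_neg (by omega), if_neg (by omega)]
      have h1 : (a.length : Int) + 1 + r + 1 = (a.length : Int) + 1 + (r + 1) := by ring
      have h2 : ((a.length + 1 + j.toNat : Nat) : Int) + f = (a.length : Int) + 1 + (((j.toNat : Nat) : Int) + f) := by
        push_cast; ring
      rw [h1, h2, hslice _ _ (by omega) (by omega)]

theorem pv_main_aux {Q : List Char} (hq : '\n' ∉ Q) :
    ∀ (n : Nat) (S : List Char), S.length ≤ n →
    (PySem.Chars.find S Q = -1 ∧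
      (PySem.Chars.splitOn S ['\n']).find? (fun l => PySem.Chars.isIn Q l) = none)
    ∨ (0 ≤ PySem.Chars.find S Q ∧
      (PySem.Chars.splitOn S ['\n']).find? (fun l => PySem.Chars.isIn Q l) =
        some (pvLineOfB S (PySem.Chars.find S Q))) := by
  intro n
  induction n with
  | zero =>
    intro S hS
    have : S = [] := List.eq_nil_of_length_eq_zero (by omega)
    subst this
    by_cases hin : PySem.Chars.isIn Q [] = true
    · right
      have hinf : Q <:+: ([] : List Char) := (PySem.Chars.isIn_iff_infix _ _).mp hin
      have hnn : 0 ≤ PySem.Chars.find ([] : List Char) Q :=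
        (PySem.Chars.find_nonneg_iff _ _).mpr hinf
      refine ⟨hnn, ?_⟩
      rw [pv_splitOn_nonl (by simp), List.find?_cons_of_pos hin,
          pv_lineOfB_nonl (by simp) hnn (PySem.Chars.find_le_length _ _)]
    · left
      refine ⟨(PySem.Chars.find_eq_neg_one_iff _ _).mpr
        (fun hinf => hin ((PySem.Chars.isIn_iff_infix _ _).mpr hinf)), ?_⟩
      rw [pv_splitOn_nonl (by simp), List.find?_cons_of_neg (by simpa using hin)]
      rfl
  | succ m ih =>
    intro S hS
    by_cases hm : '\n' ∈ S
    · obtain ⟨a, b, rfl, hna⟩ := pv_first_split hm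
      rw [pv_splitOn_app hna]
      by_cases hin : PySem.Chars.isIn Q a = true
      · right
        have hinf : Q <:+: a := (PySem.Chars.isIn_iff_infix _ _).mp hin
        have hnn : 0 ≤ PySem.Chars.find a Q := (PySem.Chars.find_nonneg_iff _ _).mpr hinf
        have hfa := pv_find_app_left (b := b) hq hinf
        refine ⟨by omega, ?_⟩
        rw [List.find?_cons_of_pos hin, hfa,
            pv_lineOfB_left hna hnn (PySem.Chars.find_le_length _ _)]
      · have hninf : ¬ Q <:+: a := fun hinf => hin ((PySem.Chars.isIn_iff_infix _ _).mpr hinf)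
        rcases ih b (by simp at hS; omega) with ⟨hfb, hfind⟩ | ⟨hfb, hfind⟩
        · left
          refine ⟨pv_find_app_none hq hninf hfb, ?_⟩
          rw [List.find?_cons_of_neg (by simpa using hin), hfind]
        · right
          have hfr := pv_find_app_right hq hninf hfb
          refine ⟨by omega, ?_⟩
          rw [List.find?_cons_of_neg (by simpa using hin), hfind, hfr,
              pv_lineOfB_shift hna hfb (PySem.Chars.find_le_length _ _)]
    · by_cases hin : PySem.Chars.isIn Q S = true
      · right
        have hinf : Q <:+: S := (PySem.Chars.isIn_iff_infix _ _).mp hin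
        have hnn : 0 ≤ PySem.Chars.find S Q := (PySem.Chars.find_nonneg_iff _ _).mpr hinf
        refine ⟨hnn, ?_⟩
        rw [pv_splitOn_nonl hm, List.find?_cons_of_pos hin,
            pv_lineOfB_nonl hm hnn (PySem.Chars.find_le_length _ _)]
      · left
        refine ⟨(PySem.Chars.find_eq_neg_one_iff _ _).mpr
          (fun hinf => hin ((PySem.Chars.isIn_iff_infix _ _).mpr hinf)), ?_⟩
        rw [pv_splitOn_nonl hm, List.find?_cons_of_neg (by simpa using hin)]
        rfl

theorem pv_singleton_infix {c : Char} {l : List Char} : [c] <:+: l ↔ c ∈ l := by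
  constructor
  · intro h; exact h.subset (by simp)
  · intro h
    obtain ⟨s, t, rfl, _⟩ := pv_first_split h
    exact ⟨s, t, by simp⟩

theorem pv_fddLoop_eq (q : String) (L : List String) :
    fddLoop q L = ((L.find? (fun l => PySem.Str.isIn q l)).map pvEmit).getD ("", "") := by
  induction L with
  | nil => rfl
  | cons l rest ih =>
    by_cases hp : PySem.Str.isIn q l = true
    · rw [fddLoop, if_pos hp, List.find?_cons_of_pos hp]
      rfl
    · rw [fddLoop, if_neg hp, List.find?_cons_of_neg (by simpa using hp), ih]

-- ===== VERDICT (by name: the statement is the Claim_ definition above) =====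
theorem find_distance_duration_spec : Claim_equal_find_distance_duration := by
  intro query text _hdom _hpre
  unfold Spec_find_distance_duration
  have hnl : ("\n" : String).toList = ['\n'] := rfl
  -- the list of lines A iterates over
  obtain ⟨L, hL, hLmap⟩ : ∃ L, PySem.Str.split? text "\n" = some L ∧
      L.map String.toList = PySem.Chars.splitOn text.toList ['\n'] := by
    have h1 := PySem.Str.split?_map text "\n"
    rw [hnl] at h1
    rw [show PySem.Chars.split? text.toList ['\n'] = some (PySem.Chars.splitOn text.toList ['\n'])
        from by simp [PySem.Chars.split?]] at h1
    cases h2 : PySem.Str.split? text "\n" with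
    | none => rw [h2] at h1; simp at h1
    | some L => rw [h2] at h1; exact ⟨L, rfl, by simpa using h1⟩
  have hA : find_distance_duration query text =
      ((L.find? (fun l => PySem.Str.isIn query l)).map pvEmit).getD ("", "") := by
    rw [find_distance_duration, hL]
    exact pv_fddLoop_eq query L
  have hfind : (PySem.Chars.splitOn text.toList ['\n']).find?
        (fun l => PySem.Chars.isIn query.toList l) =
      Option.map String.toList (L.find? (fun l => PySem.Str.isIn query l)) := by
    rw [← hLmap, List.find?_map]
    congr 1
  by_cases hq : '\n' ∈ query.toList
  · -- the query spans lines: A never matches, B returns ("", "") up front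
    have hBnl : PySem.Str.isIn "\n" query = true := by
      rw [PySem.Str.isIn_eq, hnl]
      exact (PySem.Chars.isIn_iff_infix _ _).mpr (pv_singleton_infix.mpr hq)
    have hnone : L.find? (fun l => PySem.Str.isIn query l) = none := by
      rw [List.find?_eq_none]
      intro l hl hmatch
      have hinf : query.toList <:+: l.toList := by
        rw [PySem.Str.isIn_eq] at hmatch
        exact (PySem.Chars.isIn_iff_infix _ _).mp hmatch
      have hmem : '\n' ∈ l.toList := hinf.subset hq
      have : l.toList ∈ PySem.Chars.splitOn text.toList ['\n'] := by
        rw [← hLmap]; exact List.mem_map_of_mem hl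
      exact pv_splitOn_no_nl _ text.toList (le_refl _) _ this hmem
    rw [hA, hnone, find_distance_duration_alt, if_pos hBnl]
    rfl
  · -- the query stays inside one line: the main lemma
    rcases pv_main_aux hq text.toList.length text.toList (le_refl _) with
      ⟨hneg, hfnone⟩ | ⟨hnn, hfsome⟩
    · have hnone : L.find? (fun l => PySem.Str.isIn query l) = none := by
        rw [hfnone] at hfind
        cases h : L.find? (fun l => PySem.Str.isIn query l) with
        | none => rfl
        | some l => rw [h] at hfind; simp at hfind
      rw [hA, hnone, find_distance_duration_alt,
          if_neg (by
            rw [PySem.Str.isIn_eq, hnl]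
            intro hc
            exact hq (pv_singleton_infix.mp ((PySem.Chars.isIn_iff_infix _ _).mp hc)))]
      simp only [PySem.Str.find_eq]
      rw [if_pos hneg]
      rfl
    · obtain ⟨lA, hlA, hlAeq⟩ : ∃ lA, L.find? (fun l => PySem.Str.isIn query l) = some lA ∧
          lA.toList = pvLineOfB text.toList (PySem.Chars.find text.toList query.toList) := by
        rw [hfsome] at hfind
        cases h : L.find? (fun l => PySem.Str.isIn query l) with
        | none => rw [h] at hfind; simp at hfind
        | some l =>
          rw [h] at hfind
          simp only [Option.map_some, Option.some.injEq] at hfind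
          exact ⟨l, rfl, hfind.symm⟩
      rw [hA, hlA]
      simp only [Option.map_some, Option.getD_some]
      -- reduce B to pvEmit of its sliced line
      rw [find_distance_duration_alt]
      rw [if_neg (by
            rw [PySem.Str.isIn_eq, hnl]
            intro hc
            exact hq (pv_singleton_infix.mp ((PySem.Chars.isIn_iff_infix _ _).mp hc)))]
      simp only [PySem.Str.find_eq]
      rw [if_neg (by omega)]
      show pvEmit lA = pvEmit (PySem.Str.slice text _ _)
      congr 1
      apply String.toList_inj.mp
      rw [hlAeq, PySem.Str.toList_slice]
      simp only [PySem.Chars.slice_eq_listSlice, PySem.Str.rfindFrom_eq, PySem.Str.findFrom_eq,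
        PySem.Str.len_eq, hnl, pvLineOfB]
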